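-- pv_equiv track=rewrite | github.com/Cambouu/AdventOfCode2022 | aoc/day06.py | start_of_packet
-- ===== SOURCE A (Python) =====
-- def start_of_packet(signal, msg_size):
--     # Initialize packet by size-defined character
--     marker = msg_size
--     packet = signal[:msg_size]
--
--     # Convert str to set and until every letter is unique
--     # the packet will add new characters
--     while len(set(packet)) < msg_size:
--         if marker < len(signal):
--             packet = packet[1:] + signal[marker]
--             marker += 1
--         else:
--             return None
--
--     return marker
-- ===== SOURCE B (Python) =====
-- def start_of_packet(data, msg_size):
--     # Sliding window with an incremental character-count map: O(n) instead of O(n*k).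
--     counts = {}
--     for ch in data[:msg_size]:
--         counts[ch] = counts.get(ch, 0) + 1
--     if len(counts) >= msg_size:
--         return msg_size
--     for marker, (old, new) in enumerate(zip(data, data[msg_size:]), start=msg_size):
--         counts[new] = counts.get(new, 0) + 1
--         counts[old] -= 1
--         if counts[old] == 0:
--             del counts[old]
--         if len(counts) >= msg_size:
--             return marker + 1
--     return None
-- ===== Notes on version B (the rewrite author's own statement) =====
-- stated objective: faster
-- what changed: A rebuilds set(packet) and re-slices the window string at every step (O(n*k)); B keeps a sliding-window character-count dict updated incrementally per step, checking len(counts) in O(1).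
import Mathlib
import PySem

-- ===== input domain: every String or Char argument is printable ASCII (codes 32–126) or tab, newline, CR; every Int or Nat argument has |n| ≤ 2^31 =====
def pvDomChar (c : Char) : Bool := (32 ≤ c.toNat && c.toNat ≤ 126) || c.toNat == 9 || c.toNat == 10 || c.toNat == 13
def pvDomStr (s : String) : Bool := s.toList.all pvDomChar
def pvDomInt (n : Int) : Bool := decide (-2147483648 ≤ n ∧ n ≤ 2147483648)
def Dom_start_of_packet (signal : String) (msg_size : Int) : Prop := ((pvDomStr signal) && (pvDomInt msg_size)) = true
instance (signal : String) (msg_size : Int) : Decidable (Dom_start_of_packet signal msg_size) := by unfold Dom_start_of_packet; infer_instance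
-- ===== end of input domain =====

-- B replaces A's per-step set rebuild of the window by a sliding window with an
-- incrementally updated character-count dict; same return value on every input.

-- ===== PORT A =====
-- A's while loop as structural recursion on rest = signal[marker:]
-- (the 'if marker < len(signal)' guard is 'rest ≠ []'; signal[marker] is rest's head)
def spLoopA (packet : List Char) (marker : Int) (rest : List Char) (msg_size : Int) : Option Int :=
  if (((PySem.Set.ofList packet).length : Int) < msg_size) then
    match rest with
    | [] => none
    | c :: rest' => spLoopA (packet.drop 1 ++ [c]) (marker + 1) rest' msg_size
  else some marker

def start_of_packet (signal : String) (msg_size : Int) : Option Int :=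
  let cs := signal.toList
  spLoopA (PySem.List.slice cs none (some msg_size)) msg_size (cs.drop msg_size.toNat) msg_size

-- ===== PORT B =====
-- counts[ch] = counts.get(ch, 0) + 1 over signal[:msg_size]
def spInit (cs : List Char) : PySem.Dict Char Int :=
  cs.foldl (fun d ch => d.insert ch (d.getD ch 0 + 1)) PySem.Dict.empty

-- B's for loop over enumerate(zip(signal, signal[msg_size:]), start=msg_size);
-- 'counts[old] -= 1' reads a key that is always present (old is in the window), so getD is exact here
def spLoopB (counts : PySem.Dict Char Int) (pairs : List (Int × (Char × Char))) (msg_size : Int) : Option Int :=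
  match pairs with
  | [] => none
  | (marker, (old, nw)) :: rest =>
    let c1 := counts.insert nw (counts.getD nw 0 + 1)
    let c2 := c1.insert old (c1.getD old 0 - 1)
    let c3 := if c2.getD old 0 = 0 then c2.erase old else c2
    if msg_size ≤ (c3.size : Int) then some (marker + 1) else spLoopB c3 rest msg_size

def start_of_packet_alt (signal : String) (msg_size : Int) : Option Int :=
  let cs := signal.toList
  let counts := spInit (PySem.List.slice cs none (some msg_size))
  if msg_size ≤ (counts.size : Int) then some msg_size
  else spLoopB counts
        (PySem.List.enumerate (List.zip cs (PySem.List.slice cs (some msg_size) none)) msg_size)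
        msg_size

-- ===== PRECONDITION & SPEC =====
def Spec_start_of_packet (signal : String) (msg_size : Int) (out : Option Int) : Prop := out = start_of_packet_alt signal msg_size
instance (signal : String) (msg_size : Int) (out : Option Int) : Decidable (Spec_start_of_packet signal msg_size out) := by unfold Spec_start_of_packet; infer_instance

-- ===== CLAIM (what is proved, stated in full; the proofs are below) =====
def Claim_equal_start_of_packet : Prop := ∀ (signal : String) (msg_size : Int), Dom_start_of_packet signal msg_size → Spec_start_of_packet signal msg_size (start_of_packet signal msg_size)

-- ===== LEMMAS AND PROOFS =====

-- the body of one iteration of B's loop (definitionally the lets of spLoopB, zeta-reduced)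
def spStep (d : PySem.Dict Char Int) (old c : Char) : PySem.Dict Char Int :=
  if ((d.insert c (d.getD c 0 + 1)).insert old ((d.insert c (d.getD c 0 + 1)).getD old 0 - 1)).getD old 0 = 0
  then ((d.insert c (d.getD c 0 + 1)).insert old ((d.insert c (d.getD c 0 + 1)).getD old 0 - 1)).erase old
  else (d.insert c (d.getD c 0 + 1)).insert old ((d.insert c (d.getD c 0 + 1)).getD old 0 - 1)

-- unfolding lemmas for the two loops
theorem spLoopA_stop (w : List Char) (marker : Int) (rest : List Char) (msg : Int)
    (h : ¬ (((PySem.Set.ofList w).length : Int) < msg)) :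
    spLoopA w marker rest msg = some marker := by
  rw [spLoopA.eq_def, if_neg h]

theorem spLoopA_nil (w : List Char) (marker msg : Int)
    (h : (((PySem.Set.ofList w).length : Int) < msg)) :
    spLoopA w marker [] msg = none := by
  rw [spLoopA.eq_def, if_pos h]

theorem spLoopA_cons (w : List Char) (c : Char) (rest' : List Char) (marker msg : Int)
    (h : (((PySem.Set.ofList w).length : Int) < msg)) :
    spLoopA w marker (c :: rest') msg = spLoopA (w.drop 1 ++ [c]) (marker + 1) rest' msg := by
  rw [spLoopA.eq_def, if_pos h]

theorem spLoopB_cons (d : PySem.Dict Char Int) (marker : Int) (old c : Char)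
    (rest : List (Int × (Char × Char))) (msg : Int) :
    spLoopB d ((marker, (old, c)) :: rest) msg =
      if msg ≤ ((spStep d old c).size : Int) then some (marker + 1)
      else spLoopB (spStep d old c) rest msg := by
  rw [spLoopB]
  unfold spStep
  rfl

-- d is exactly the character-count table of the window w
def GoodCnt (w : List Char) (d : PySem.Dict Char Int) : Prop :=
  d.keys.Nodup ∧ (∀ c, c ∈ d.keys ↔ c ∈ w) ∧ (∀ c, d.getD c 0 = (w.count c : Int))

theorem find?_filter_self (l : List (Char × Int)) (k : Char) :
    List.find? (fun p => p.1 == k) (l.filter (fun p => !(p.1 == k))) = none := by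
  induction l with
  | nil => rfl
  | cons p l ih => by_cases h : p.1 = k <;> simp [List.filter_cons, List.find?_cons, h, ih]

theorem find?_filter_ne (l : List (Char × Int)) (k x : Char) (hxk : x ≠ k) :
    List.find? (fun p => p.1 == x) (l.filter (fun p => !(p.1 == k)))
      = List.find? (fun p => p.1 == x) l := by
  induction l with
  | nil => rfl
  | cons p l ih =>
    by_cases hk : p.1 = k
    · have hx : p.1 ≠ x := by rw [hk]; exact fun h => hxk h.symm
      simp [List.filter_cons, List.find?_cons, hk, hx, Ne.symm hxk, ih]
    · by_cases hx : p.1 = x <;> simp [List.filter_cons, List.find?_cons, hk, hx, hxk, ih]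

theorem getD_erase (d : PySem.Dict Char Int) (k x : Char) (v : Int) :
    (d.erase k).getD x v = if x = k then v else d.getD x v := by
  simp only [PySem.Dict.erase, PySem.Dict.getD, PySem.Dict.get?]
  by_cases hxk : x = k
  · subst hxk; rw [find?_filter_self, if_pos rfl]; rfl
  · rw [find?_filter_ne _ _ _ hxk, if_neg hxk]

theorem keys_erase (d : PySem.Dict Char Int) (k : Char) :
    (d.erase k).keys = d.keys.filter (fun x => !(x == k)) := by
  simp only [PySem.Dict.erase, PySem.Dict.keys]
  induction d.items with
  | nil => simp
  | cons p l ih => by_cases hk : p.1 = k <;> simp [List.filter_cons, hk, ih]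

theorem size_of_good (w : List Char) (d : PySem.Dict Char Int) (h : GoodCnt w d) :
    d.size = (PySem.Set.ofList w).length := by
  obtain ⟨hnd, hmem, _⟩ := h
  have hlen : d.keys.length = d.size := by
    simp [PySem.Dict.keys, PySem.Dict.size]
  have hperm : d.keys.Perm (PySem.Set.ofList w) := by
    rw [List.perm_ext_iff_of_nodup hnd (PySem.Set.nodup_ofList w)]
    intro a; rw [PySem.Set.mem_ofList]; exact hmem a
  rw [← hlen, hperm.length_eq]

theorem good_init (w : List Char) : GoodCnt w (spInit w) := by
  unfold spInit
  rw [PySem.Dict.foldl_insert_getD_add_one_eq_counter]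
  refine ⟨PySem.Dict.nodup_keys_counter w, ?_, fun c => PySem.Dict.getD_counter w c⟩
  intro c; rw [PySem.Dict.keys_counter, PySem.Set.mem_ofList]

-- the updated dict holds exactly the counts of the new window
theorem cnt_step (wt : List Char) (old c x : Char) (d : PySem.Dict Char Int)
    (hcnt : ∀ y, d.getD y 0 = ((old :: wt).count y : Int)) :
    ((d.insert c (d.getD c 0 + 1)).insert old ((d.insert c (d.getD c 0 + 1)).getD old 0 - 1)).getD x 0
      = ((wt ++ [c]).count x : Int) := by
  have hx := hcnt x; have ho := hcnt old; have hc' := hcnt c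
  clear hcnt
  simp only [PySem.Dict.getD_insert]
  simp only [List.count_cons, List.count_append, List.count_nil, beq_iff_eq] at hx ho hc' ⊢
  by_cases hxo : x = old <;> by_cases hoc : old = c <;> by_cases hxc : x = c <;>
    (try subst hxo) <;> (try subst hoc) <;> (try subst hxc) <;>
    split_ifs at hx ho hc' ⊢ <;> (try subst_eqs) <;>
    first
      | (exact absurd rfl (by assumption))
      | ((try push_cast at *); omega)

-- one sliding-window step preserves GoodCnt
theorem good_step (old c : Char) (wt : List Char) (d : PySem.Dict Char Int)
    (h : GoodCnt (old :: wt) d) : GoodCnt (wt ++ [c]) (spStep d old c) := by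
  obtain ⟨hnd, hmem, hcnt⟩ := h
  have hgetD2 : ∀ x,
      ((d.insert c (d.getD c 0 + 1)).insert old ((d.insert c (d.getD c 0 + 1)).getD old 0 - 1)).getD x 0
        = ((wt ++ [c]).count x : Int) := fun x => cnt_step wt old c x d hcnt
  unfold spStep
  set c2 := (d.insert c (d.getD c 0 + 1)).insert old ((d.insert c (d.getD c 0 + 1)).getD old 0 - 1) with hc2
  have hkeys2 : ∀ x, x ∈ c2.keys ↔ (x = old ∨ x = c ∨ x ∈ (old :: wt)) := by
    intro x
    rw [hc2, PySem.Dict.mem_keys_insert, PySem.Dict.mem_keys_insert, hmem]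
  have hnd2 : c2.keys.Nodup := by
    rw [hc2]
    exact PySem.Dict.nodup_keys_insert _ _ _ (PySem.Dict.nodup_keys_insert _ _ _ hnd)
  by_cases hz : c2.getD old 0 = 0
  · -- old's count dropped to 0: it is deleted; old ∉ wt ++ [c]
    have hnotin : old ∉ wt ++ [c] := by
      intro hin
      have h0 := hgetD2 old
      rw [hz] at h0
      have h1 : (wt ++ [c]).count old = 0 := by exact_mod_cast h0.symm
      exact (List.count_eq_zero.mp h1) hin
    rw [if_pos hz]
    refine ⟨?_, ?_, ?_⟩
    · rw [keys_erase]; exact hnd2.filter _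
    · intro x
      rw [keys_erase, List.mem_filter]
      constructor
      · rintro ⟨hx, hne⟩
        have hne' : x ≠ old := by simpa using hne
        rcases (hkeys2 x).mp hx with h | h | h
        · exact absurd h hne'
        · simp [h]
        · rcases List.mem_cons.mp h with h | h
          · exact absurd h hne'
          · simp [h]
      · intro hx
        have hne : x ≠ old := fun he => hnotin (he ▸ hx)
        refine ⟨(hkeys2 x).mpr ?_, by simpa using hne⟩
        rcases List.mem_append.mp hx with h | h
        · right; right; exact List.mem_cons_of_mem _ h
        · right; left; simpa using h
    · intro x
      rw [getD_erase]
      split_ifs with hxo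
      · subst hxo
        have h1 : (wt ++ [c]).count x = 0 := List.count_eq_zero.mpr hnotin
        simp [h1]
      · exact hgetD2 x
  · -- old still occurs in the new window: dict kept as is
    have hin : old ∈ wt ++ [c] := by
      by_contra hno
      have h1 : (wt ++ [c]).count old = 0 := List.count_eq_zero.mpr hno
      rw [hgetD2 old, h1] at hz
      simp at hz
    rw [if_neg hz]
    refine ⟨hnd2, ?_, hgetD2⟩
    intro x
    rw [hkeys2]
    constructor
    · rintro (h | h | h)
      · exact h ▸ hin
      · simp [h]
      · rcases List.mem_cons.mp h with h | h
        · exact h ▸ hin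
        · simp [h]
    · intro hx
      rcases List.mem_append.mp hx with h | h
      · right; right; exact List.mem_cons_of_mem _ h
      · right; left; simpa using h

-- lockstep equality of the two loops
theorem loops_eq (rest : List Char) : ∀ (w : List Char) (d : PySem.Dict Char Int) (marker msg : Int),
    GoodCnt w d → (rest ≠ [] → (w.length : Int) = msg) → ¬ (msg ≤ (d.size : Int)) →
    spLoopA w marker rest msg =
      spLoopB d (PySem.List.enumerate (List.zip (w ++ rest) rest) marker) msg := by
  induction rest with
  | nil =>
    intro w d marker msg hg _ hlt
    have hsz : d.size = (PySem.Set.ofList w).length := size_of_good w d hg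
    rw [spLoopA_nil w marker msg (by omega)]
    simp [spLoopB, PySem.List.enumerate]
  | cons c rest' ih =>
    intro w d marker msg hg hlen hlt
    have hsz : d.size = (PySem.Set.ofList w).length := size_of_good w d hg
    have hcond : ((PySem.Set.ofList w).length : Int) < msg := by omega
    have hwlen : (w.length : Int) = msg := hlen (by simp)
    obtain ⟨old, wt, rfl⟩ : ∃ old wt, w = old :: wt := by
      cases w with
      | nil =>
        exfalso
        simp only [List.length_nil, Nat.cast_zero] at hwlen
        omega
      | cons a l => exact ⟨a, l, rfl⟩
    have hzip : List.zip ((old :: wt) ++ (c :: rest')) (c :: rest')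
        = (old, c) :: List.zip ((wt ++ [c]) ++ rest') rest' := by
      rw [List.cons_append, List.zip_cons_cons, List.append_cons]
    rw [hzip, PySem.List.enumerate_cons, spLoopB_cons,
        spLoopA_cons _ c rest' marker msg hcond]
    simp only [List.drop_one, List.tail_cons]
    have hg' : GoodCnt (wt ++ [c]) (spStep d old c) := good_step old c wt d hg
    have hsz' : (spStep d old c).size = (PySem.Set.ofList (wt ++ [c])).length :=
      size_of_good _ _ hg'
    by_cases hdone : msg ≤ ((spStep d old c).size : Int)
    · rw [if_pos hdone, spLoopA_stop _ _ _ _ (by omega)]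
    · rw [if_neg hdone]
      have hwlen' : ((wt ++ [c]).length : Int) = msg := by
        simp only [List.length_cons] at hwlen
        simp only [List.length_append, List.length_singleton]
        push_cast at hwlen ⊢
        omega
      exact ih (wt ++ [c]) (spStep d old c) (marker + 1) msg hg' (fun _ => hwlen') hdone

-- ===== VERDICT (by name: the statement is the Claim_ definition above) =====
theorem start_of_packet_spec : Claim_equal_start_of_packet := by
  intro signal msg _
  unfold Spec_start_of_packet start_of_packet start_of_packet_alt
  simp only
  set cs := signal.toList with hcs
  set w0 := PySem.List.slice cs none (some msg) with hw0
  have hg0 : GoodCnt w0 (spInit w0) := good_init w0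
  have hsz0 : (spInit w0).size = (PySem.Set.ofList w0).length := size_of_good _ _ hg0
  by_cases hstop : msg ≤ ((spInit w0).size : Int)
  · rw [if_pos hstop, spLoopA_stop _ _ _ _ (by omega)]
  · rw [if_neg hstop]
    have hmsg1 : (1 : Int) ≤ msg := by omega
    have hslice1 : w0 = cs.take msg.toNat := by
      rw [hw0, PySem.List.slice_to cs (by omega : (0:Int) ≤ msg)]
    have hslice2 : PySem.List.slice cs (some msg) none = cs.drop msg.toNat :=
      PySem.List.slice_from cs (by omega : (0:Int) ≤ msg)
    have hsplit : cs = w0 ++ cs.drop msg.toNat := by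
      rw [hslice1, List.take_append_drop]
    rw [hslice2]
    calc spLoopA w0 msg (cs.drop msg.toNat) msg
        = spLoopB (spInit w0)
            (PySem.List.enumerate (List.zip (w0 ++ cs.drop msg.toNat) (cs.drop msg.toNat)) msg) msg := by
          apply loops_eq (cs.drop msg.toNat) w0 (spInit w0) msg msg hg0 ?_ hstop
          intro hne
          have hlt : msg.toNat < cs.length := by
            by_contra hge
            exact hne (List.drop_eq_nil_of_le (by omega))
          rw [hslice1, List.length_take]
          omega
      _ = spLoopB (spInit w0) (PySem.List.enumerate (List.zip cs (cs.drop msg.toNat)) msg) msg := by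
          rw [← hsplit]
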